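-- pv_equiv track=rewrite | github.com/vp5dt/ICP_Assignment_python | ICP2/source/gameboard.py | board_draw
-- ===== SOURCE A (Python) =====
-- def board_draw(height, width):
--     # Initialising Board Parameter
--     board = ""
--     # Getting the Size using height and width
--
--     # Iterating the boardSize using range function
--     for ran in range(height):
--
--      board = board+" ---" * (width) + "\n"
--      for x in range(width):
--          board = board+"|   "
--      board = board + "|   \n"
--
--     # Finally, adding the Horizontal lines at the end
--     board = board + " ---" * (width)
--     return board
-- ===== SOURCE B (Python) =====
-- def board_draw(height, width):
--     horiz = " ---" * width
--     vert = "|   " * width + "|   "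
--     return "\n".join([horiz, vert] * height + [horiz])
-- ===== Notes on version B (the rewrite author's own statement) =====
-- stated objective: faster
-- what changed: B builds the board as a list of whole lines (alternating horizontal and vertical-cell lines) and joins them with newlines once, instead of A's accumulator loop with a per-cell inner loop repeatedly re-concatenating one growing string.
import Mathlib
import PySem

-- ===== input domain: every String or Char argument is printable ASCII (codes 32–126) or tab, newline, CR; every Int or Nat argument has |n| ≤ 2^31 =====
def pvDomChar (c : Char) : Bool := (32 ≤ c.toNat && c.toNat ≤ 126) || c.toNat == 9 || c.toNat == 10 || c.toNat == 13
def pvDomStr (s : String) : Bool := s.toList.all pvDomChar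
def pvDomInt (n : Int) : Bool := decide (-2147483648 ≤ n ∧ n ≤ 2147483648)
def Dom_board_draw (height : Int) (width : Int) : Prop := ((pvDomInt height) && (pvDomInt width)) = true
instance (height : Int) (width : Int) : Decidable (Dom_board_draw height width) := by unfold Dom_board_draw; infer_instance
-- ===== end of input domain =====

-- B builds the board as a list of whole lines joined with "\n" instead of A's
-- accumulator loop with a per-cell inner loop repeatedly re-concatenating one string (objective: faster).


-- ===== PORT A =====
-- literal transliteration: board accumulated as a String, " ---"*width via pyRepeat,
-- the inner for-loop over range(width) appending "|   " each iteration
def board_draw (height : Int) (width : Int) : String :=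
  let board : String := ""
  let board := (PySem.List.pyRange 0 height 1).foldl (fun board _ =>
    let board := board ++ String.ofList (PySem.List.pyRepeat " ---".toList width) ++ "\n"
    let board := (PySem.List.pyRange 0 width 1).foldl (fun b _ => b ++ "|   ") board
    board ++ "|   \n") board
  board ++ String.ofList (PySem.List.pyRepeat " ---".toList width)

-- ===== PORT B =====
-- B: build the list of lines [horiz, vert]*height + [horiz] and join with "\n"
def board_draw_alt (height : Int) (width : Int) : String :=
  let horiz := String.ofList (PySem.List.pyRepeat " ---".toList width)
  let vert := String.ofList (PySem.List.pyRepeat "|   ".toList width) ++ "|   "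
  PySem.Str.join "\n" (PySem.List.pyRepeat [horiz, vert] height ++ [horiz])

-- ===== PRECONDITION & SPEC =====
def Spec_board_draw (height : Int) (width : Int) (out : String) : Prop := out = board_draw_alt height width
instance (height : Int) (width : Int) (out : String) : Decidable (Spec_board_draw height width out) := by unfold Spec_board_draw; infer_instance

-- ===== CLAIM (what is proved, stated in full; the proofs are below) =====
def Claim_equal_board_draw : Prop := ∀ (height : Int) (width : Int), Dom_board_draw height width → Spec_board_draw height width (board_draw height width)

-- ===== LEMMAS AND PROOFS =====

theorem pyRepeat_eq_flatten {α : Type} (xs : List α) (n : Int) :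
    PySem.List.pyRepeat xs n = (List.replicate n.toNat xs).flatten := rfl

theorem length_pyRange_zero (n : Int) :
    (PySem.List.pyRange 0 n 1).length = n.toNat := by
  simp [PySem.List.length_pyRange_one]

-- a fold whose step appends a fixed chunk (seen through toList) appends length-many copies
theorem foldl_toList_step {α : Type} (l : List α) (step : String → String) (blk : List Char)
    (h : ∀ s, (step s).toList = s.toList ++ blk) (init : String) :
    (l.foldl (fun b _ => step b) init).toList
      = init.toList ++ (List.replicate l.length blk).flatten := by
  induction l generalizing init with
  | nil => simp
  | cons x xs ih => simp [List.foldl_cons, ih, h, List.replicate_succ, List.append_assoc]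

theorem intercalate_cons_of_ne_nil {α : Type} (c x : List α) (l : List (List α)) (h : l ≠ []) :
    List.intercalate c (x :: l) = x ++ c ++ List.intercalate c l := by
  obtain ⟨y, ys, rfl⟩ := List.exists_cons_of_ne_nil h
  simp [List.intercalate, List.intersperse, List.append_assoc]

theorem join_blocks (c h v hz : List Char) (n : Nat) :
    PySem.Chars.join c ((List.replicate n [h, v]).flatten ++ [hz])
      = (List.replicate n (h ++ c ++ v ++ c)).flatten ++ hz := by
  induction n with
  | zero => simp [PySem.Chars.join, List.intercalate]
  | succ n ih =>
    have hne : (List.replicate n [h, v]).flatten ++ [hz] ≠ [] := by simp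
    simp only [List.replicate_succ, List.flatten_cons, List.cons_append, List.append_assoc,
      List.nil_append]
    unfold PySem.Chars.join at *
    rw [intercalate_cons_of_ne_nil c h _ (by simp),
        intercalate_cons_of_ne_nil c v _ hne, ih]
    simp [List.append_assoc]

-- ===== VERDICT (by name: the statement is the Claim_ definition above) =====
theorem board_draw_spec : Claim_equal_board_draw := by
  intro height width _
  show board_draw height width = board_draw_alt height width
  rw [← String.toList_inj]
  unfold board_draw board_draw_alt
  dsimp only []
  simp only [String.toList_append]
  -- the row body of A appends one fixed block per iteration
  rw [foldl_toList_step (PySem.List.pyRange 0 height 1)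
      (fun board =>
        (PySem.List.pyRange 0 width 1).foldl (fun b _ => b ++ "|   ")
          (board ++ String.ofList (PySem.List.pyRepeat " ---".toList width) ++ "\n") ++ "|   \n")
      (PySem.List.pyRepeat " ---".toList width ++ "\n".toList
        ++ (List.replicate width.toNat "|   ".toList).flatten ++ "|   \n".toList)
      (fun s => by
        dsimp only []
        simp only [String.toList_append]
        rw [foldl_toList_step (PySem.List.pyRange 0 width 1) (fun b => b ++ "|   ")
            "|   ".toList (fun t => by simp) _]
        simp [List.append_assoc])]
  simp only [PySem.Str.toList_join, List.map_append, pyRepeat_eq_flatten, List.map_flatten,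
    List.map_replicate, List.map_cons, List.map_nil, String.toList_append, String.toList_ofList,
    length_pyRange_zero]
  rw [join_blocks]
  have h1 : ("|   \n".toList : List Char) = "|   ".toList ++ "\n".toList := by decide
  simp [h1, List.append_assoc]
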